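-- pv_equiv track=rewrite | github.com/pypi-data/pypi-mirror-12 | packages/sortseq/sortseq-0.0.7.tar.gz/sortseq-0.0.7/src/utils.py | seq2mat3
-- ===== SOURCE A (Python) =====
-- def seq2mat3(seq):
--     #Returns a parameterized matrix for 3 base pair interactions
--     pair_dict = {'A':0,'C':1, 'G':2,'T':3}
--     trilist = []
--     lseq = len(seq)
--     index = 0
--     for i,bp in enumerate(seq):
--         for z in range(i+1,lseq-1):
--             for q in range(z+1,lseq):
--                 if bp + seq[z] + seq[q] == 'TTT':
--                     continue
--                 trilist.append(
--                     index*63 + pair_dict[bp]*16 + pair_dict[seq[z]]*4 +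
--                     pair_dict[seq[q]])
--                 index = index +1
--     return trilist
-- ===== SOURCE B (Python) =====
-- def seq2mat3(seq):
--     # Backwards suffix pass: maintain the (z,q) pair list of the current tail
--     # incrementally, emit one block of triple codes per head, then flatten
--     # front-to-back and let enumerate supply the 63-stride index.
--     pair_dict = {'A': 0, 'C': 1, 'G': 2, 'T': 3}
--     blocks = []
--     pairs = []   # (z, q) character pairs of the current tail, lexicographic order
--     tail = []
--     for c in reversed(seq):
--         blocks.append([pair_dict[c]*16 + pair_dict[z]*4 + pair_dict[q]
--                        for (z, q) in pairs if (c, z, q) != ('T', 'T', 'T')])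
--         pairs = [(c, w) for w in tail] + pairs
--         tail = [c] + tail
--     codes = [x for blk in reversed(blocks) for x in blk]
--     return [k*63 + x for k, x in enumerate(codes)]
-- ===== Notes on version B (the rewrite author's own statement) =====
-- stated objective: alternative
-- what changed: Replaces A's three nested index loops with a running counter by a single backwards pass that incrementally maintains the pair list of the current suffix (each head extends it), emitting one block of triple codes per head, then flattens the blocks front-to-back and indexes with enumerate.
import Mathlib
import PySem

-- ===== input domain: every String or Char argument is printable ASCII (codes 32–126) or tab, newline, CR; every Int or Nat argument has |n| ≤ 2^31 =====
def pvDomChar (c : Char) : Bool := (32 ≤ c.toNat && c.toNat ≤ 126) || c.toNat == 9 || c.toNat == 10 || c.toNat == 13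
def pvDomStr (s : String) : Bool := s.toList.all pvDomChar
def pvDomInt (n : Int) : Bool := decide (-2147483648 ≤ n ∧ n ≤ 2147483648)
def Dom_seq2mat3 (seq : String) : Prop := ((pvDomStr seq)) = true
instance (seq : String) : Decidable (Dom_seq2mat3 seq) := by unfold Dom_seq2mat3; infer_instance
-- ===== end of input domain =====

-- B replaces A's three nested index loops with a running counter by a single backwards
-- pass maintaining the suffix's pair list incrementally, one code block per head, then a
-- flatten + enumerate indexing pass (objective: alternative decomposition, same cost).

-- ===== PORT A =====
-- the dict literal {'A':0,'C':1,'G':2,'T':3} both sources define; the default 0 of getD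
-- is never reached inside Pre_ (a missing key is Python's KeyError, excluded by Pre_)
def pvPairDict : PySem.Dict Char Int :=
  PySem.Dict.ofList [('A', 0), ('C', 1), ('G', 2), ('T', 3)]

def seq2mat3 (seq : String) : List Int :=
  let s := seq.toList
  let lseq : Int := PySem.List.len s
  -- state (trilist, index); bp + seq[z] + seq[q] == 'TTT' is the 3-char string comparison
  let r := (PySem.List.enumerate s).foldl (fun (st : List Int × Int) ibp =>
    (PySem.List.pyRange (ibp.1 + 1) (lseq - 1)).foldl (fun st z =>
      (PySem.List.pyRange (z + 1) lseq).foldl (fun st q =>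
        if String.ofList [ibp.2, PySem.List.pyGetD s z 'A', PySem.List.pyGetD s q 'A'] = "TTT" then st
        else (st.1 ++ [st.2 * 63 + pvPairDict.getD ibp.2 0 * 16 +
                pvPairDict.getD (PySem.List.pyGetD s z 'A') 0 * 4 +
                pvPairDict.getD (PySem.List.pyGetD s q 'A') 0], st.2 + 1)) st) st) ([], 0)
  r.1

-- ===== PORT B =====
def seq2mat3_alt (seq : String) : List Int :=
  let s := seq.toList
  -- for c in reversed(seq): one block per head; state (blocks, pairs, tail)
  let r := s.reverse.foldl (fun (st : List (List Int) × List (Char × Char) × List Char) c =>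
    (st.1 ++ [st.2.1.flatMap (fun p =>
        if (c, p.1, p.2) = ('T', 'T', 'T') then []
        else [pvPairDict.getD c 0 * 16 + pvPairDict.getD p.1 0 * 4 +
              pvPairDict.getD p.2 0])],
     st.2.2.map (fun w => (c, w)) ++ st.2.1,
     c :: st.2.2)) ([], [], [])
  -- codes = [x for blk in reversed(blocks) for x in blk]
  let codes := r.1.reverse.flatMap (fun blk => blk)
  -- [k*63 + x for k, x in enumerate(codes)]
  (PySem.List.enumerate codes).map (fun kc => kc.1 * 63 + kc.2)

-- ===== PRECONDITION & SPEC =====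
-- Pre_ excludes exactly the inputs where A raises KeyError: a sequence of length ≥ 3
-- containing a character outside 'ACGT' (some non-'TTT' triple then reaches pair_dict).
def Pre_seq2mat3 (seq : String) : Prop :=
  seq.toList.length < 3 ∨
    (seq.toList.all (fun c => c == 'A' || c == 'C' || c == 'G' || c == 'T')) = true
instance (seq : String) : Decidable (Pre_seq2mat3 seq) := by unfold Pre_seq2mat3; infer_instance
def pvWitness_seq2mat3 : String := "ACGT"

def Spec_seq2mat3 (seq : String) (out : List Int) : Prop := out = seq2mat3_alt seq
instance (seq : String) (out : List Int) : Decidable (Spec_seq2mat3 seq out) := by unfold Spec_seq2mat3; infer_instance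

-- ===== CLAIM (what is proved, stated in full; the proofs are below) =====
def Claim_equal_seq2mat3 : Prop := ∀ (seq : String), Dom_seq2mat3 seq → Pre_seq2mat3 seq → Spec_seq2mat3 seq (seq2mat3 seq)

-- ===== LEMMAS AND PROOFS =====

-- the triple's content code and its kept/skipped contribution, the common reference
def pvCode (c b q : Char) : Int :=
  pvPairDict.getD c 0 * 16 + pvPairDict.getD b 0 * 4 + pvPairDict.getD q 0

def pvGq (c b q : Char) : List Int :=
  if c = 'T' ∧ b = 'T' ∧ q = 'T' then [] else [pvCode c b q]

-- pvIdx n cs = [n*63 + c₀, (n+1)*63 + c₁, …]: the indexing both programs perform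
def pvIdx (n : Int) : List Int → List Int
  | [] => []
  | c :: cs => (n * 63 + c) :: pvIdx (n + 1) cs

theorem pvIdx_append (as : List Int) : ∀ (n : Int) (bs : List Int),
    pvIdx n (as ++ bs) = pvIdx n as ++ pvIdx (n + (as.length : Int)) bs := by
  induction as with
  | nil => intro n bs; simp [pvIdx]
  | cons a as ih =>
      intro n bs
      simp only [List.cons_append, pvIdx, ih (n + 1) bs, List.length_cons]
      push_cast; ring_nf

-- a fold that appends pvIdx-indexed blocks and advances the counter is the
-- pvIdx-indexing of the concatenated blocks
theorem pvFoldGen {β : Type} (g : β → List Int) (xs : List β) : ∀ (l : List Int) (n : Int),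
    xs.foldl (fun st x => (st.1 ++ pvIdx st.2 (g x), st.2 + ((g x).length : Int))) (l, n)
      = (l ++ pvIdx n (xs.flatMap g), n + ((xs.flatMap g).length : Int)) := by
  induction xs with
  | nil => intro l n; simp [pvIdx]
  | cons x xs ih =>
      intro l n
      simp only [List.foldl_cons, ih, List.flatMap_cons, pvIdx_append, List.append_assoc,
        List.length_append]
      simp only [Prod.mk.injEq]
      exact ⟨trivial, by push_cast; ring⟩

theorem pvEnumMap (cs : List Int) : ∀ (n : Int),
    (PySem.List.enumerate cs n).map (fun kc => kc.1 * 63 + kc.2) = pvIdx n cs := by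
  induction cs with
  | nil => intro n; simp [PySem.List.enumerate, pvIdx]
  | cons c cs ih => intro n; simp [PySem.List.enumerate_cons, pvIdx, ih]

-- A's 'bp + seq[z] + seq[q] == "TTT"' test produces exactly pvGq
theorem pvGqStr (c b q : Char) :
    (if String.ofList [c, b, q] = "TTT" then ([] : List Int) else [pvCode c b q]) = pvGq c b q := by
  unfold pvGq
  have h : (String.ofList [c, b, q] = "TTT") ↔ (c = 'T' ∧ b = 'T' ∧ q = 'T') := by
    constructor
    · intro h
      have h' : ([c, b, q] : List Char) = ['T', 'T', 'T'] := by
        have := congrArg String.toList h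
        simpa using this
      simp_all
    · rintro ⟨rfl, rfl, rfl⟩; rfl
  simp only [h]

-- B's tuple test '(c, z, q) != ("T","T","T")' produces exactly pvGq as well
theorem pvGqTup (c b q : Char) :
    (if (c, b, q) = ('T', 'T', 'T') then ([] : List Int) else [pvCode c b q]) = pvGq c b q := by
  unfold pvGq
  simp only [Prod.mk.injEq]

theorem pvFlatMap_congr {α β : Type} {xs : List α} {f g : α → List β}
    (h : ∀ x ∈ xs, f x = g x) : xs.flatMap f = xs.flatMap g := by
  induction xs with
  | nil => rfl
  | cons x xs ih =>
      simp only [List.flatMap_cons, h x (by simp)]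
      rw [ih (fun y hy => h y (by simp [hy]))]

-- drop the last (empty-contribution) element of a range inside a flatMap
theorem pvRange_drop_last (a L : Int) (f : Int → List Int) (hf : f (L - 1) = []) :
    (PySem.List.pyRange a L).flatMap f = (PySem.List.pyRange a (L - 1)).flatMap f := by
  by_cases h : a ≤ L - 1
  case pos =>
    rw [PySem.List.pyRange_one_append a (L - 1) L h (by omega)]
    have hsing : PySem.List.pyRange (L - 1) L = [L - 1] := by
      have := PySem.List.pyRange_one_singleton (L - 1)
      rwa [show L - 1 + 1 = L by omega] at this
    simp [hsing, hf]
  case neg =>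
    rw [PySem.List.pyRange_one_eq_nil (by omega), PySem.List.pyRange_one_eq_nil (by omega)]

-- an index-range flatMap reading xs[q] is a flatMap over the dropped suffix
theorem pvFlatMap_getD {α : Type} (xs : List α) (d : α) (a : Int) (ha : 0 ≤ a)
    (h : α → List Int) :
    (PySem.List.pyRange a (PySem.List.len xs)).flatMap (fun q => h (PySem.List.pyGetD xs q d))
      = (xs.drop a.toNat).flatMap h := by
  rw [← PySem.List.map_pyGetD_pyRange xs d ha, List.flatMap_map]

-- pvSuf s = [(s₀, tail after it), (s₁, tail after it), …]: the suffix decomposition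
def pvSuf {α : Type} : List α → List (α × List α)
  | [] => []
  | c :: t => (c, t) :: pvSuf t

theorem length_pvSuf {α : Type} : ∀ (s : List α), (pvSuf s).length = s.length
  | [] => rfl
  | c :: t => by simp [pvSuf, length_pvSuf t]

theorem getElem_pvSuf {α : Type} : ∀ (s : List α) (k : Nat) (h : k < (pvSuf s).length),
    (pvSuf s)[k] = (s[k]'(by rw [← length_pvSuf]; exact h), s.drop (k + 1))
  | c :: t, 0, _ => rfl
  | c :: t, k + 1, h => by
      simp only [pvSuf, List.getElem_cons_succ, List.drop_succ_cons]
      exact getElem_pvSuf t k (by simpa [pvSuf] using h)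

theorem drop_pvSuf {α : Type} : ∀ (s : List α) (k : Nat), (pvSuf s).drop k = pvSuf (s.drop k)
  | _, 0 => by simp
  | [], _ + 1 => by simp [pvSuf]
  | c :: t, k + 1 => by simp only [pvSuf, List.drop_succ_cons]; exact drop_pvSuf t k

-- KEY: an index-range flatMap reading xs[z] and the suffix after z is a flatMap over pvSuf
theorem pvKey {α : Type} (d : α) (s : List α) (F : α → List α → List Int) (a : Int)
    (ha : 0 ≤ a) :
    (PySem.List.pyRange a (PySem.List.len s)).flatMap
        (fun z => F (PySem.List.pyGetD s z d) (s.drop (z + 1).toNat))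
      = (pvSuf (s.drop a.toNat)).flatMap (fun p => F p.1 p.2) := by
  have hlen : PySem.List.len s = PySem.List.len (pvSuf s) := by
    simp [PySem.List.len_eq, length_pvSuf]
  have h1 : ∀ z ∈ PySem.List.pyRange a (PySem.List.len s),
      F (PySem.List.pyGetD s z d) (s.drop (z + 1).toNat)
        = (fun p : α × List α => F p.1 p.2) (PySem.List.pyGetD (pvSuf s) z (d, [])) := by
    intro z hz
    obtain ⟨hz1, hz2⟩ := PySem.List.mem_pyRange_one.mp hz
    have hz0 : 0 ≤ z := le_trans ha hz1
    have hzl : z < (s.length : Int) := by simpa [PySem.List.len_eq] using hz2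
    have hzl' : z < ((pvSuf s).length : Int) := by rw [length_pvSuf]; exact hzl
    rw [PySem.List.pyGetD_eq_getElem s d hz0 hzl,
        PySem.List.pyGetD_eq_getElem (pvSuf s) (d, []) hz0 hzl',
        getElem_pvSuf s z.toNat (by omega)]
    have : (z + 1).toNat = z.toNat + 1 := by omega
    rw [this]
  rw [pvFlatMap_congr h1, hlen]
  exact (pvFlatMap_getD (pvSuf s) (d, []) a ha (fun p => F p.1 p.2)).trans
    (by rw [drop_pvSuf])

-- B's incremental state: pair list of a suffix, per-head block, blocks back-to-front
def pvPairs : List Char → List (Char × Char)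
  | [] => []
  | c :: t => t.map (fun w => (c, w)) ++ pvPairs t

def pvBlock (c : Char) (ps : List (Char × Char)) : List Int :=
  ps.flatMap (fun p =>
    if (c, p.1, p.2) = ('T', 'T', 'T') then []
    else [pvPairDict.getD c 0 * 16 + pvPairDict.getD p.1 0 * 4 + pvPairDict.getD p.2 0])

def pvBlocksRev : List Char → List (List Int)
  | [] => []
  | c :: t => pvBlocksRev t ++ [pvBlock c (pvPairs t)]

-- B's foldr (= its foldl over the reversed list) computes exactly that state
theorem pvBfold (s : List Char) :
    s.foldr (fun c (st : List (List Int) × List (Char × Char) × List Char) =>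
      (st.1 ++ [st.2.1.flatMap (fun p =>
          if (c, p.1, p.2) = ('T', 'T', 'T') then []
          else [pvPairDict.getD c 0 * 16 + pvPairDict.getD p.1 0 * 4 +
                pvPairDict.getD p.2 0])],
       st.2.2.map (fun w => (c, w)) ++ st.2.1,
       c :: st.2.2)) ([], [], [])
      = (pvBlocksRev s, pvPairs s, s) := by
  induction s with
  | nil => rfl
  | cons c t ih => rw [List.foldr_cons, ih]; rfl

-- flattening the reversed blocks = one block per pvSuf entry, in order
theorem pvBlocksFlat (s : List Char) :
    (pvBlocksRev s).reverse.flatMap (fun blk => blk)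
      = (pvSuf s).flatMap (fun ct => pvBlock ct.1 (pvPairs ct.2)) := by
  induction s with
  | nil => rfl
  | cons c t ih => simp [pvBlocksRev, pvSuf, ih]

-- a head's block over the suffix's pair list = the nested suffix expansion
theorem pvBlockEq (c : Char) (t : List Char) :
    pvBlock c (pvPairs t) = (pvSuf t).flatMap (fun p => p.2.flatMap (pvGq c p.1)) := by
  induction t with
  | nil => rfl
  | cons b u ih =>
      simp only [pvPairs, pvSuf, pvBlock, List.flatMap_append, List.flatMap_cons,
        List.flatMap_map]
      rw [show (pvPairs u).flatMap _ = pvBlock c (pvPairs u) from rfl, ih]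
      congr 1
      apply pvFlatMap_congr
      intro q _
      exact pvGqTup c b q

-- A's enumerate/range triple comprehension, read through pvKey twice, is the same
theorem pvCodesA (s : List Char) :
    (PySem.List.enumerate s).flatMap (fun ibp =>
      (PySem.List.pyRange (ibp.1 + 1) (PySem.List.len s - 1)).flatMap (fun z =>
        (PySem.List.pyRange (z + 1) (PySem.List.len s)).flatMap (fun q =>
          if String.ofList [ibp.2, PySem.List.pyGetD s z 'A', PySem.List.pyGetD s q 'A'] = "TTT"
          then []
          else [pvPairDict.getD ibp.2 0 * 16 +
                pvPairDict.getD (PySem.List.pyGetD s z 'A') 0 * 4 +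
                pvPairDict.getD (PySem.List.pyGetD s q 'A') 0])))
      = (pvSuf s).flatMap (fun ct => (pvSuf ct.2).flatMap (fun p => p.2.flatMap (pvGq ct.1 p.1))) := by
  set L : Int := PySem.List.len s with hL
  rw [PySem.List.enumerate_eq_map_pyRange s 'A', List.flatMap_map, ← hL]
  have houter : ∀ j ∈ PySem.List.pyRange 0 L,
      (PySem.List.pyRange (j + 1) (L - 1)).flatMap (fun z =>
        (PySem.List.pyRange (z + 1) L).flatMap (fun q =>
          if String.ofList [PySem.List.pyGetD s j 'A', PySem.List.pyGetD s z 'A',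
              PySem.List.pyGetD s q 'A'] = "TTT" then []
          else [pvPairDict.getD (PySem.List.pyGetD s j 'A') 0 * 16 +
                pvPairDict.getD (PySem.List.pyGetD s z 'A') 0 * 4 +
                pvPairDict.getD (PySem.List.pyGetD s q 'A') 0]))
        = (fun c t => (pvSuf t).flatMap (fun p => p.2.flatMap (pvGq c p.1)))
            (PySem.List.pyGetD s j 'A') (s.drop (j + 1).toNat) := by
    intro j hj
    obtain ⟨hj0, _⟩ := PySem.List.mem_pyRange_one.mp hj
    set c := PySem.List.pyGetD s j 'A' with hc
    -- restore the full range: the z = L-1 term contributes nothing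
    rw [← pvRange_drop_last (j + 1) L _ (by
      rw [show L - 1 + 1 = L by ring, PySem.List.pyRange_one_eq_nil (le_refl L)]; rfl)]
    -- innermost loop → suffix flatMap, and the string test → pvGq
    have hmid : ∀ z ∈ PySem.List.pyRange (j + 1) L,
        (PySem.List.pyRange (z + 1) L).flatMap (fun q =>
          if String.ofList [c, PySem.List.pyGetD s z 'A', PySem.List.pyGetD s q 'A'] = "TTT"
          then []
          else [pvPairDict.getD c 0 * 16 +
                pvPairDict.getD (PySem.List.pyGetD s z 'A') 0 * 4 +
                pvPairDict.getD (PySem.List.pyGetD s q 'A') 0])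
          = (fun b u => u.flatMap (pvGq c b))
              (PySem.List.pyGetD s z 'A') (s.drop (z + 1).toNat) := by
      intro z hz
      obtain ⟨hz1, _⟩ := PySem.List.mem_pyRange_one.mp hz
      set b := PySem.List.pyGetD s z 'A' with hb
      have hconv : ∀ q ∈ PySem.List.pyRange (z + 1) L,
          (if String.ofList [c, b, PySem.List.pyGetD s q 'A'] = "TTT" then ([] : List Int)
           else [pvPairDict.getD c 0 * 16 + pvPairDict.getD b 0 * 4 +
                 pvPairDict.getD (PySem.List.pyGetD s q 'A') 0])
            = (fun x => pvGq c b x) (PySem.List.pyGetD s q 'A') := by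
        intro q _
        exact pvGqStr c b (PySem.List.pyGetD s q 'A')
      rw [pvFlatMap_congr hconv, hL, pvFlatMap_getD s 'A' (z + 1) (by omega)]
    rw [pvFlatMap_congr hmid, hL]
    exact pvKey 'A' s (fun b u => u.flatMap (pvGq c b)) (j + 1) (by omega)
  rw [pvFlatMap_congr houter]
  have := pvKey 'A' s (fun c t => (pvSuf t).flatMap (fun p => p.2.flatMap (pvGq c p.1))) 0 (le_refl 0)
  simpa using this

-- A's port evaluates to pvIdx 0 of its triple comprehension
theorem pvAIdx (seq : String) :
    seq2mat3 seq = pvIdx 0 ((PySem.List.enumerate seq.toList).flatMap (fun ibp =>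
      (PySem.List.pyRange (ibp.1 + 1) (PySem.List.len seq.toList - 1)).flatMap (fun z =>
        (PySem.List.pyRange (z + 1) (PySem.List.len seq.toList)).flatMap (fun q =>
          if String.ofList [ibp.2, PySem.List.pyGetD seq.toList z 'A',
              PySem.List.pyGetD seq.toList q 'A'] = "TTT" then []
          else [pvPairDict.getD ibp.2 0 * 16 +
                pvPairDict.getD (PySem.List.pyGetD seq.toList z 'A') 0 * 4 +
                pvPairDict.getD (PySem.List.pyGetD seq.toList q 'A') 0])))) := by
  simp only [seq2mat3]
  set s := seq.toList with hs
  set L : Int := PySem.List.len s with hL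
  set gq : Char → Int → Int → List Int := fun bp z q =>
    if String.ofList [bp, PySem.List.pyGetD s z 'A', PySem.List.pyGetD s q 'A'] = "TTT" then []
    else [pvPairDict.getD bp 0 * 16 + pvPairDict.getD (PySem.List.pyGetD s z 'A') 0 * 4 +
          pvPairDict.getD (PySem.List.pyGetD s q 'A') 0] with hgq
  have h3 : ∀ (bp : Char) (z : Int) (st : List Int × Int),
      (PySem.List.pyRange (z + 1) L).foldl (fun st q =>
          if String.ofList [bp, PySem.List.pyGetD s z 'A', PySem.List.pyGetD s q 'A'] = "TTT" then st
          else (st.1 ++ [st.2 * 63 + pvPairDict.getD bp 0 * 16 +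
                  pvPairDict.getD (PySem.List.pyGetD s z 'A') 0 * 4 +
                  pvPairDict.getD (PySem.List.pyGetD s q 'A') 0], st.2 + 1)) st
        = (st.1 ++ pvIdx st.2 ((PySem.List.pyRange (z + 1) L).flatMap (gq bp z)),
           st.2 + (((PySem.List.pyRange (z + 1) L).flatMap (gq bp z)).length : Int)) := by
    intro bp z st
    have hstep : (fun (st : List Int × Int) q =>
        if String.ofList [bp, PySem.List.pyGetD s z 'A', PySem.List.pyGetD s q 'A'] = "TTT" then st
        else (st.1 ++ [st.2 * 63 + pvPairDict.getD bp 0 * 16 +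
                pvPairDict.getD (PySem.List.pyGetD s z 'A') 0 * 4 +
                pvPairDict.getD (PySem.List.pyGetD s q 'A') 0], st.2 + 1))
        = (fun (st : List Int × Int) q =>
            (st.1 ++ pvIdx st.2 (gq bp z q), st.2 + ((gq bp z q).length : Int))) := by
      funext st q
      by_cases hc : String.ofList [bp, PySem.List.pyGetD s z 'A', PySem.List.pyGetD s q 'A'] = "TTT"
      · simp [hgq, hc, pvIdx]
      · simp [hgq, hc, pvIdx, add_assoc]
    rw [hstep]
    cases st with
    | mk l n => rw [pvFoldGen]
  have h2 : ∀ (bp : Char) (i : Int) (st : List Int × Int),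
      (PySem.List.pyRange (i + 1) (L - 1)).foldl (fun st z =>
          (PySem.List.pyRange (z + 1) L).foldl (fun st q =>
            if String.ofList [bp, PySem.List.pyGetD s z 'A', PySem.List.pyGetD s q 'A'] = "TTT" then st
            else (st.1 ++ [st.2 * 63 + pvPairDict.getD bp 0 * 16 +
                    pvPairDict.getD (PySem.List.pyGetD s z 'A') 0 * 4 +
                    pvPairDict.getD (PySem.List.pyGetD s q 'A') 0], st.2 + 1)) st) st
        = (st.1 ++ pvIdx st.2 ((PySem.List.pyRange (i + 1) (L - 1)).flatMap (fun z =>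
              (PySem.List.pyRange (z + 1) L).flatMap (gq bp z))),
           st.2 + ((((PySem.List.pyRange (i + 1) (L - 1)).flatMap (fun z =>
              (PySem.List.pyRange (z + 1) L).flatMap (gq bp z))).length : Int)) ) := by
    intro bp i st
    have hstep : (fun (st : List Int × Int) z =>
        (PySem.List.pyRange (z + 1) L).foldl (fun st q =>
          if String.ofList [bp, PySem.List.pyGetD s z 'A', PySem.List.pyGetD s q 'A'] = "TTT" then st
          else (st.1 ++ [st.2 * 63 + pvPairDict.getD bp 0 * 16 +
                  pvPairDict.getD (PySem.List.pyGetD s z 'A') 0 * 4 +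
                  pvPairDict.getD (PySem.List.pyGetD s q 'A') 0], st.2 + 1)) st)
        = (fun (st : List Int × Int) z =>
            (st.1 ++ pvIdx st.2 ((PySem.List.pyRange (z + 1) L).flatMap (gq bp z)),
             st.2 + (((PySem.List.pyRange (z + 1) L).flatMap (gq bp z)).length : Int))) := by
      funext st z
      exact h3 bp z st
    rw [hstep]
    cases st with
    | mk l n => rw [pvFoldGen]
  have hstep : (fun (st : List Int × Int) (ibp : Int × Char) =>
      (PySem.List.pyRange (ibp.1 + 1) (L - 1)).foldl (fun st z =>
        (PySem.List.pyRange (z + 1) L).foldl (fun st q =>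
          if String.ofList [ibp.2, PySem.List.pyGetD s z 'A', PySem.List.pyGetD s q 'A'] = "TTT" then st
          else (st.1 ++ [st.2 * 63 + pvPairDict.getD ibp.2 0 * 16 +
                  pvPairDict.getD (PySem.List.pyGetD s z 'A') 0 * 4 +
                  pvPairDict.getD (PySem.List.pyGetD s q 'A') 0], st.2 + 1)) st) st)
      = (fun (st : List Int × Int) (ibp : Int × Char) =>
          (st.1 ++ pvIdx st.2 ((PySem.List.pyRange (ibp.1 + 1) (L - 1)).flatMap (fun z =>
              (PySem.List.pyRange (z + 1) L).flatMap (gq ibp.2 z))),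
           st.2 + (((PySem.List.pyRange (ibp.1 + 1) (L - 1)).flatMap (fun z =>
              (PySem.List.pyRange (z + 1) L).flatMap (gq ibp.2 z))).length : Int))) := by
    funext st ibp
    exact h2 ibp.2 ibp.1 st
  rw [hstep, pvFoldGen]
  simp [hgq]

-- B's port evaluates to pvIdx 0 of the flattened blocks
theorem pvBIdx (seq : String) :
    seq2mat3_alt seq
      = pvIdx 0 ((pvSuf seq.toList).flatMap (fun ct =>
          (pvSuf ct.2).flatMap (fun p => p.2.flatMap (pvGq ct.1 p.1)))) := by
  simp only [seq2mat3_alt]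
  rw [List.foldl_reverse, pvBfold, pvBlocksFlat, pvEnumMap]
  congr 1
  apply pvFlatMap_congr
  intro ct _
  exact pvBlockEq ct.1 ct.2

theorem pvPortsEq (seq : String) : seq2mat3 seq = seq2mat3_alt seq := by
  rw [pvAIdx, pvBIdx, pvCodesA]

-- ===== VERDICT (by name: the statement is the Claim_ definition above) =====
theorem seq2mat3_spec : Claim_equal_seq2mat3 := by
  intro seq _ _
  unfold Spec_seq2mat3
  exact pvPortsEq seq
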